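-- pv_equiv track=rewrite | github.com/freddmo/Independent-Study | 7.TrainGCNWithLKH.py | is_valid_tour
-- ===== SOURCE A (Python) =====
-- def is_valid_tour(tour, demands, vehicle_capacity):
--     if tour[0] != 0 or tour[-1] != 0:
--         return False
--     visited = set()
--     current_capacity = 0
--     for i in range(1, len(tour)):
--         node = tour[i]
--         if node == 0:
--             if current_capacity > vehicle_capacity:
--                 return False
--             current_capacity = 0
--         else:
--             if node in visited:
--                 return False
--             visited.add(node)
--             current_capacity += demands[node]
--     return visited == set(range(1, len(demands)))
-- ===== SOURCE B (Python) =====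
-- def is_valid_tour(tour, demands, vehicle_capacity):
--     if tour[0] != 0 or tour[-1] != 0:
--         return False
--     # split tour[1:] at each depot (0) into routes; the trailing segment is
--     # empty because the tour ends at the depot, so it is dropped
--     routes = []
--     cur = []
--     for node in tour[1:]:
--         if node == 0:
--             routes.append(cur)
--             cur = []
--         else:
--             cur.append(node)
--     visited = set()
--     for route in routes:
--         load = 0
--         for node in route:
--             if node in visited:
--                 return False
--             visited.add(node)
--             load += demands[node]
--         if load > vehicle_capacity:
--             return False
--     return visited == set(range(1, len(demands)))
-- ===== Notes on version B (the rewrite author's own statement) =====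
-- stated objective: alternative
-- what changed: B first splits the tour at each depot visit into a list of sub-routes and then validates route by route (duplicate check, demand accumulation, per-route capacity check), instead of A's single interleaved scan with a running capacity reset at every 0.
import Mathlib
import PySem

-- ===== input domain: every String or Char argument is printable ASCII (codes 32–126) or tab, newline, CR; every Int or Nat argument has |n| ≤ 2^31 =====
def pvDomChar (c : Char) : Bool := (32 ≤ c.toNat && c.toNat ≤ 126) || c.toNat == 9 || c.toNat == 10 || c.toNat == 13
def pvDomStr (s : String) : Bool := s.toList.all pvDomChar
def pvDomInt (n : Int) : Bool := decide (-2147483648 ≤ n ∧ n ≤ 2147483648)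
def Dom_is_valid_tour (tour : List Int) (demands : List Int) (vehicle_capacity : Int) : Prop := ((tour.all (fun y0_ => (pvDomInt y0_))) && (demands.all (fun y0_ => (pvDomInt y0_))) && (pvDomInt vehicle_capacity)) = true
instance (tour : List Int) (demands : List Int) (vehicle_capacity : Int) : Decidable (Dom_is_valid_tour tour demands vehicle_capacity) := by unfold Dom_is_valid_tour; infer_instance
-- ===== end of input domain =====

-- B splits the tour at each depot visit into sub-routes and validates route by route,
-- instead of A's single interleaved scan; same cost, different decomposition.

-- ===== PORT A =====
-- the for-loop of A: state (visited, current_capacity); none = early 'return False'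
-- (a failed demands[node] lookup also yields none; Pre_ excludes exactly those inputs)
def pvALoop (demands : List Int) (vc : Int) : List Int → PySem.Set Int → Int → Option (PySem.Set Int)
  | [], visited, _ => some visited
  | node :: rest, visited, cur =>
    if node = 0 then
      if cur > vc then none
      else pvALoop demands vc rest visited 0
    else
      if PySem.Set.contains visited node then none
      else
        match PySem.List.pyGet? demands node with
        | none => none
        | some d => pvALoop demands vc rest (PySem.Set.add visited node) (cur + d)

def is_valid_tour (tour : List Int) (demands : List Int) (vehicle_capacity : Int) : Bool :=
  match PySem.List.pyGet? tour 0, PySem.List.pyGet? tour (-1) with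
  | some h, some l =>
    if h ≠ 0 || l ≠ 0 then false
    else
      match pvALoop demands vehicle_capacity (tour.drop 1) PySem.Set.empty 0 with
      | none => false
      | some visited =>
        PySem.Set.equal visited (PySem.Set.ofList (PySem.List.pyRange 1 (demands.length : Int) 1))
  | _, _ => false  -- IndexError (empty tour): outside Pre_

-- ===== PORT B =====
-- split tour[1:] at each 0; the trailing (empty) segment is dropped
def pvBSplit : List Int → List Int → List (List Int)
  | [], _ => []
  | node :: rest, cur =>
    if node = 0 then cur :: pvBSplit rest []
    else pvBSplit rest (cur ++ [node])

-- the inner per-route loop of B; none = early 'return False'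
def pvBRoute (demands : List Int) : List Int → PySem.Set Int → Int → Option (PySem.Set Int × Int)
  | [], visited, load => some (visited, load)
  | node :: rest, visited, load =>
    if PySem.Set.contains visited node then none
    else
      match PySem.List.pyGet? demands node with
      | none => none
      | some d => pvBRoute demands rest (PySem.Set.add visited node) (load + d)

-- the outer loop over routes
def pvBRoutes (demands : List Int) (vc : Int) : List (List Int) → PySem.Set Int → Option (PySem.Set Int)
  | [], visited => some visited
  | r :: rs, visited =>
    match pvBRoute demands r visited 0 with
    | none => none
    | some (v, load) => if load > vc then none else pvBRoutes demands vc rs v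

def is_valid_tour_alt (tour : List Int) (demands : List Int) (vehicle_capacity : Int) : Bool :=
  match PySem.List.pyGet? tour 0 with
  | none => false  -- IndexError (empty tour): outside Pre_
  | some h =>
    match PySem.List.pyGet? tour (-1) with
    | none => false
    | some l =>
      if h ≠ 0 || l ≠ 0 then false
      else
        match pvBRoutes demands vehicle_capacity (pvBSplit (tour.drop 1) []) PySem.Set.empty with
        | some visited =>
          PySem.Set.equal visited (PySem.Set.ofList (PySem.List.pyRange 1 (demands.length : Int) 1))
        | none => false

-- ===== PRECONDITION & SPEC =====
-- current_capacity of A at a depot position j of ts = tour[1:]: the sum of demands of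
-- the maximal block of non-zero nodes ending just before j (out-of-range lookups count 0;
-- in the contexts where this sum is used every node of the block is in range)
def pvSegSum (demands : List Int) (ts : List Int) (j : Nat) : Int :=
  (((List.range j).filter (fun k =>
      ts.getD k 0 != 0 &&
      ((List.range j).all fun m => !(decide (k < m)) || ts.getD m 0 != 0))).map
    (fun k => (PySem.List.pyGet? demands (ts.getD k 0)).getD 0)).sum

-- A raises IndexError at position i of ts = tour[1:] iff ts[i] is a non-zero node outside
-- demands' index range, not seen earlier (duplicate check fires first), and no earlier
-- position already returned False: earlier non-zero nodes are in range and pairwise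
-- distinct, and every earlier depot's block sum is within capacity
def pvRaiseAt (ts demands : List Int) (vc : Int) (i : Nat) : Bool :=
  let n : Int := (demands.length : Int)
  let node := ts.getD i 0
  node != 0 &&
  !(decide (-n ≤ node) && decide (node < n)) &&
  ((List.range i).all fun j => ts.getD j 0 != node) &&
  ((List.range i).all fun j =>
    ts.getD j 0 == 0 || (decide (-n ≤ ts.getD j 0) && decide (ts.getD j 0 < n))) &&
  ((List.range i).all fun j =>
    ts.getD j 0 == 0 || ((List.range j).all fun k => ts.getD k 0 != ts.getD j 0)) &&
  ((List.range i).all fun j => ts.getD j 0 != 0 || decide (pvSegSum demands ts j ≤ vc))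

-- Pre_ excludes EXACTLY the inputs on which A raises IndexError: the empty tour
-- (tour[0]), and depot-to-depot tours whose scan reaches a fresh out-of-range node
-- before any early 'return False' (duplicate or capacity) would fire; A returns a
-- value on every input Pre_ admits, and on no input Pre_ excludes.
def Pre_is_valid_tour (tour : List Int) (demands : List Int) (vehicle_capacity : Int) : Prop :=
  tour ≠ [] ∧
  (tour.head? = some 0 ∧ tour.getLast? = some 0 →
    ((List.range (tour.drop 1).length).all fun i =>
      !pvRaiseAt (tour.drop 1) demands vehicle_capacity i) = true)
instance (tour : List Int) (demands : List Int) (vehicle_capacity : Int) : Decidable (Pre_is_valid_tour tour demands vehicle_capacity) := by unfold Pre_is_valid_tour; infer_instance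

def pvWitness_is_valid_tour : List Int × List Int × Int := ([0, 1, 2, 0, 3, 0], [0, 2, 3, 1], 6)

def Spec_is_valid_tour (tour : List Int) (demands : List Int) (vehicle_capacity : Int) (out : Bool) : Prop := out = is_valid_tour_alt tour demands vehicle_capacity
instance (tour : List Int) (demands : List Int) (vehicle_capacity : Int) (out : Bool) : Decidable (Spec_is_valid_tour tour demands vehicle_capacity out) := by unfold Spec_is_valid_tour; infer_instance

-- ===== CLAIM (what is proved, stated in full; the proofs are below) =====
def Claim_equal_is_valid_tour : Prop := ∀ (tour : List Int) (demands : List Int) (vehicle_capacity : Int), Dom_is_valid_tour tour demands vehicle_capacity → Pre_is_valid_tour tour demands vehicle_capacity → Spec_is_valid_tour tour demands vehicle_capacity (is_valid_tour tour demands vehicle_capacity)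

-- ===== LEMMAS AND PROOFS =====

-- pvBRoute over a concatenation = pvBRoute over the first part, then the rest
theorem pvBRoute_append (demands : List Int) (p q : List Int) (v : PySem.Set Int) (l : Int) :
    pvBRoute demands (p ++ q) v l =
      match pvBRoute demands p v l with
      | none => none
      | some (v', l') => pvBRoute demands q v' l' := by
  induction p generalizing v l with
  | nil => simp [pvBRoute]
  | cons x xs ih =>
    simp only [List.cons_append, pvBRoute]
    split
    · rfl
    · cases h : PySem.List.pyGet? demands x
      · rfl
      · exact ih _ _

-- if the pending segment already fails, the whole route list fails
theorem pvBRoutes_of_route_none (demands : List Int) (vc : Int) (xs p : List Int)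
    (v0 : PySem.Set Int)
    (hlast : xs.getLast? = some 0)
    (hp : pvBRoute demands p v0 0 = none) :
    pvBRoutes demands vc (pvBSplit xs p) v0 = none := by
  induction xs generalizing p with
  | nil => simp at hlast
  | cons x rest ih =>
    by_cases hx : x = 0
    · subst hx
      simp [pvBSplit, pvBRoutes, hp]
    · simp only [pvBSplit, if_neg hx]
      rcases rest with _ | ⟨y, ys⟩
      · simp [List.getLast?] at hlast; exact absurd hlast hx
      · refine ih _ ?_ ?_
        · simpa [List.getLast?_cons_cons] using hlast
        · rw [pvBRoute_append, hp]

-- main invariant: A's interleaved loop equals B's route-by-route processing,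
-- given that the pending segment p replays to (visited, load)
theorem pvLoop_eq (demands : List Int) (vc : Int) (xs : List Int) (p : List Int)
    (v0 visited : PySem.Set Int) (load : Int)
    (hlast : (xs = [] ∧ p = []) ∨ xs.getLast? = some 0)
    (hp : pvBRoute demands p v0 0 = some (visited, load)) :
    pvALoop demands vc xs visited load = pvBRoutes demands vc (pvBSplit xs p) v0 := by
  induction xs generalizing p v0 visited load with
  | nil =>
    rcases hlast with ⟨_, hp0⟩ | h
    · subst hp0
      simp only [pvBRoute] at hp
      cases hp
      simp [pvALoop, pvBSplit, pvBRoutes]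
    · simp at h
  | cons x rest ih =>
    have hlast' : rest = [] ∧ x = 0 ∨ rest.getLast? = some 0 := by
      rcases hlast with ⟨h, _⟩ | h
      · simp at h
      · rcases rest with _ | ⟨y, ys⟩
        · left
          constructor
          · rfl
          · simpa [List.getLast?] using h
        · right; simpa [List.getLast?_cons_cons] using h
    by_cases hx : x = 0
    · subst hx
      have hsplit : pvBSplit (0 :: rest) p = p :: pvBSplit rest [] := by simp [pvBSplit]
      rw [hsplit]
      simp only [pvALoop, pvBRoutes, hp]
      by_cases hc : load > vc
      · simp [hc]
      · simp only [hc, if_false]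
        rcases hlast' with ⟨h0, _⟩ | h0
        · subst h0; simp [pvALoop, pvBSplit, pvBRoutes]
        · exact ih [] visited visited 0 (Or.inr h0) (by simp [pvBRoute])
    · have hrest : rest.getLast? = some 0 := by
        rcases hlast' with ⟨_, h0⟩ | h0
        · exact absurd h0 hx
        · exact h0
      simp only [pvALoop, pvBSplit, if_neg hx]
      by_cases hv : x ∈ visited
      · rw [if_pos (by simpa [PySem.Set.contains] using hv)]
        refine (pvBRoutes_of_route_none demands vc rest _ v0 hrest ?_).symm
        rw [pvBRoute_append, hp]
        simp [pvBRoute, hv]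
      · rw [if_neg (by simpa [PySem.Set.contains] using hv)]
        cases hd : PySem.List.pyGet? demands x with
        | none =>
          dsimp only
          refine (pvBRoutes_of_route_none demands vc rest _ v0 hrest ?_).symm
          rw [pvBRoute_append, hp]
          simp [pvBRoute, hv, hd]
        | some d =>
          dsimp only
          refine ih (p ++ [x]) v0 _ _ (Or.inr hrest) ?_
          rw [pvBRoute_append, hp]
          simp [pvBRoute, hv, hd]

-- ===== VERDICT (by name: the statement is the Claim_ definition above) =====
theorem is_valid_tour_spec : Claim_equal_is_valid_tour := by
  intro tour demands vc _ hpre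
  unfold Spec_is_valid_tour is_valid_tour is_valid_tour_alt
  rcases hpre with ⟨hne, _⟩
  rcases tour with _ | ⟨t0, ts⟩
  · exact absurd rfl hne
  have hg0 : PySem.List.pyGet? (t0 :: ts) 0 = some t0 := by
    simp [PySem.List.pyGet?, PySem.List.pyIdx?]
  obtain ⟨l, hl⟩ : ∃ l, (t0 :: ts).getLast? = some l := by
    rcases List.getLast?_isSome.mpr (List.cons_ne_nil t0 ts) |> Option.isSome_iff_exists.mp with ⟨l, hl⟩
    exact ⟨l, hl⟩
  have hg1 : PySem.List.pyGet? (t0 :: ts) (-1) = some l := by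
    have : PySem.List.pyGet? (t0 :: ts) (-1) = (t0 :: ts).getLast? := by
      simp [PySem.List.pyGet?, PySem.List.pyIdx?, List.getLast?_eq_getElem?]
    rw [this, hl]
  rw [hg0, hg1]
  dsimp only
  by_cases hcond : (decide (t0 ≠ 0) || decide (l ≠ 0)) = true
  · rw [if_pos hcond, if_pos hcond]
  · rw [if_neg hcond, if_neg hcond]
    have hl0 : l = 0 := by
      simp only [Bool.or_eq_true, decide_eq_true_eq, not_or] at hcond
      simpa using hcond.2
    have hlast : (ts = [] ∧ ([] : List Int) = []) ∨ ts.getLast? = some 0 := by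
      rcases ts with _ | ⟨y, ys⟩
      · exact Or.inl ⟨rfl, rfl⟩
      · right
        rw [← hl0, ← hl, List.getLast?_cons_cons]
    rw [List.drop_one, List.tail_cons,
      pvLoop_eq demands vc ts [] PySem.Set.empty PySem.Set.empty 0 hlast (by simp [pvBRoute])]
    cases pvBRoutes demands vc (pvBSplit ts []) PySem.Set.empty <;> rfl
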